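-- pv_equiv track=rewrite | github.com/alsonjiang/NUS-homework | CS1010E/Practical Exam 2/22-23_sem1/question3.py | min_no_of_turns
-- ===== SOURCE A (Python) =====
-- def min_no_of_turns(L: tuple) -> int:
--     moves = 0 #to count number of moves
--
--     if not L: #input is empty
--         return 0
--
--     else:
--         lst = sorted(L) #sort the array in ascending order
--         while lst: #while list is not empty [1, 1, 2, 3, 5, 6, 7, 8]
--             max_length = 1
--             max_index = 0
--
--             #find the longest consecutive subsequence
--             for i in range(len(lst)):
--                 current_length = 1
--                 while (i + current_length < len(lst)) and (lst[i + current_length] == lst[i] + current_length):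
--                     #ensure subsequence does not exceed length of list AND ensure next elem is equal to one greater than current elem
--                     current_length +=1 #extend the subsequence to cover next elem
--
--                 if current_length > max_length: #once found a new longest subsequence
--                     max_length = current_length #update the max_length value
--                     max_index = i #save the starting index of the new longest subsequence
--
--             if max_length == 1: #no more consecutive subsequence, only individual numbers
--                 return moves + len(lst)
--                 #num of moves to clear individual nums = length of the array *mindblown*
--                 #eg. [3,6,9] needs 3 moves to clear 3 nums
--
--             #if there are subsequences available to clear
--             lst = lst[:max_index] + lst[max_index + max_length:]
--             #returns everything before index to be cut, and everything after index+length of subsequence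
--             moves += 1
--
--     return moves
-- ===== SOURCE B (Python) =====
-- def min_no_of_turns(L: tuple) -> int:
--     moves = 0
--     lst = sorted(L)
--     while lst:
--         n = len(lst)
--         # one backward DP pass: runs[i] = length of the consecutive run starting at i
--         runs = [1] * n
--         for i in range(n - 2, -1, -1):
--             if lst[i + 1] == lst[i] + 1:
--                 runs[i] = runs[i + 1] + 1
--         best_len, best_idx = 1, 0
--         for i in range(n):
--             if runs[i] > best_len:
--                 best_len, best_idx = runs[i], i
--         if best_len == 1:
--             return moves + n
--         lst = lst[:best_idx] + lst[best_idx + best_len:]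
--         moves += 1
--     return moves
-- ===== Notes on version B (the rewrite author's own statement) =====
-- stated objective: alternative
-- what changed: Each round's run lengths are computed by a single backward dynamic-programming pass (runs[i] = runs[i+1]+1 when adjacent values differ by 1) instead of A's nested rescan that re-extends every run element by element from every start index; the greedy removal loop is unchanged, so measured cost is similar on typical inputs.
import Mathlib
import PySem

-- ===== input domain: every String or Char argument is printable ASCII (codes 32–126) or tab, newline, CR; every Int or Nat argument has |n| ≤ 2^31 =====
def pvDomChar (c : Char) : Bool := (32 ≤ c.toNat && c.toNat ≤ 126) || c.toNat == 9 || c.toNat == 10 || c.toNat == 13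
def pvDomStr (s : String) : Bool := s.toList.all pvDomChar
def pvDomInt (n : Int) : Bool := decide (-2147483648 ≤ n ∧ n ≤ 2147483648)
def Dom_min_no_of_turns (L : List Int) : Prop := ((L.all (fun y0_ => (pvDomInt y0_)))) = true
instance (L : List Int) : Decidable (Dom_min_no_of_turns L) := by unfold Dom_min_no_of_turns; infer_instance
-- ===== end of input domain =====

-- B replaces A's per-start-index rescan of run lengths by one backward DP pass per removal round; the greedy removal loop itself is unchanged (alternative algorithm, similar measured cost).

-- ===== PORT A =====
-- inner `while` of A: extends current_length c while lst[i+c] == lst[i] + c (fuel-bounded; fuel lst.length suffices)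
def pvAW (lst : List Int) : Nat → Nat → Nat → Nat
  | 0, _, c => c
  | f+1, i, c =>
    if i + c < lst.length ∧ lst.getD (i+c) 0 = lst.getD i 0 + (c : Int)
    then pvAW lst f i (c+1) else c

-- A's `for i in range(len(lst))` scan tracking (max_length, max_index)
def pvAScan (lst : List Int) : Nat × Nat :=
  (List.range lst.length).foldl (fun m i =>
    if pvAW lst lst.length i 1 > m.1 then (pvAW lst lst.length i 1, i) else m) (1, 0)

-- A's outer `while lst:` loop (fuel-bounded; each recursive round removes ≥ 2 elements, so fuel len+1 suffices)
def pvALoop : Nat → List Int → Int → Int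
  | 0, _, moves => moves
  | f+1, lst, moves =>
    if lst.isEmpty then moves
    else
      let s := pvAScan lst
      if s.1 = 1 then moves + (lst.length : Int)
      else pvALoop f (lst.take s.2 ++ lst.drop (s.2 + s.1)) (moves + 1)

def min_no_of_turns (L : List Int) : Int :=
  if L.isEmpty then 0
  else pvALoop (L.length + 1) (PySem.List.sorted L (fun x => x) false) 0

-- ===== PORT B =====
-- B's backward DP pass: runs[i] = runs[i+1] + 1 if lst[i+1] == lst[i] + 1 else 1,
-- rendered as right-to-left structural recursion (runs[i+1] = head of the suffix's runs)
def pvBRuns : List Int → List Nat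
  | [] => []
  | [_] => [1]
  | x :: y :: rest =>
    let rs := pvBRuns (y :: rest)
    (if y = x + 1 then rs.headD 0 + 1 else 1) :: rs

-- B's `for i in range(n)` scan over the precomputed runs, tracking (best_len, best_idx)
def pvBScan (lst : List Int) : Nat × Nat :=
  (List.range lst.length).foldl (fun m i =>
    if (pvBRuns lst).getD i 1 > m.1 then ((pvBRuns lst).getD i 1, i) else m) (1, 0)

-- B's outer `while lst:` loop (same fuel bound as A's)
def pvBLoop : Nat → List Int → Int → Int
  | 0, _, moves => moves
  | f+1, lst, moves =>
    if lst.isEmpty then moves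
    else
      let s := pvBScan lst
      if s.1 = 1 then moves + (lst.length : Int)
      else pvBLoop f (lst.take s.2 ++ lst.drop (s.2 + s.1)) (moves + 1)

def min_no_of_turns_alt (L : List Int) : Int :=
  pvBLoop (L.length + 1) (PySem.List.sorted L (fun x => x) false) 0

-- ===== PRECONDITION & SPEC =====
def Spec_min_no_of_turns (L : List Int) (out : Int) : Prop := out = min_no_of_turns_alt L
instance (L : List Int) (out : Int) : Decidable (Spec_min_no_of_turns L out) := by unfold Spec_min_no_of_turns; infer_instance

-- ===== CLAIM (what is proved, stated in full; the proofs are below) =====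
def Claim_equal_min_no_of_turns : Prop := ∀ (L : List Int), Dom_min_no_of_turns L → Spec_min_no_of_turns L (min_no_of_turns L)

-- ===== LEMMAS AND PROOFS =====

-- the inner-while function ignores a cons'd head when the start index is shifted by one
theorem pvAW_shift (x : Int) : ∀ (f : Nat) (lst : List Int) (i c : Nat),
    pvAW (x :: lst) f (i+1) c = pvAW lst f i c := by
  intro f
  induction f with
  | zero => intro lst i c; rfl
  | succ f ih =>
    intro lst i c
    have hidx : i + 1 + c = (i + c) + 1 := by omega
    simp only [pvAW, hidx, List.getD_cons_succ, List.length_cons, Nat.add_lt_add_iff_right]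
    split_ifs with h
    · exact ih lst i (c+1)
    · rfl

-- extending a run across the head: if lst starts with x+1 then the run at 0 in (x :: lst) is one longer
theorem pvAW_ext (x : Int) : ∀ (f : Nat) (lst : List Int) (c : Nat),
    lst.getD 0 0 = x + 1 →
    pvAW (x :: lst) f 0 (c+1) = pvAW lst f 0 c + 1 := by
  intro f
  induction f with
  | zero => intro lst c h; rfl
  | succ f ih =>
    intro lst c h
    have hcond : (0 + (c+1) < (x :: lst).length ∧ (x :: lst).getD (0 + (c+1)) 0 = (x :: lst).getD 0 0 + ((c+1 : Nat) : Int))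
        ↔ (0 + c < lst.length ∧ lst.getD (0 + c) 0 = lst.getD 0 0 + ((c : Nat) : Int)) := by
      simp only [Nat.zero_add, List.length_cons, List.getD_cons_succ, List.getD_cons_zero,
        Nat.add_lt_add_iff_right, h]
      constructor
      · rintro ⟨h1, h2⟩; exact ⟨h1, by push_cast at h2 ⊢; linarith⟩
      · rintro ⟨h1, h2⟩; exact ⟨h1, by push_cast at h2 ⊢; linarith⟩
    simp only [pvAW]
    split_ifs with h1 h2 h2
    · exact ih lst (c+1) h
    · exact absurd (hcond.mp h1) h2
    · exact absurd (hcond.mpr h2) h1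
    · rfl

-- fuel stability: any fuel ≥ lst.length - (i+c) gives the same answer
theorem pvAW_stable : ∀ (f f' : Nat) (lst : List Int) (i c : Nat),
    lst.length ≤ i + c + f → lst.length ≤ i + c + f' →
    pvAW lst f i c = pvAW lst f' i c := by
  intro f
  induction f with
  | zero =>
    intro f' lst i c h h'
    cases f' with
    | zero => rfl
    | succ g =>
      have hlt : ¬ (i + c < lst.length) := by omega
      simp [pvAW, hlt]
  | succ f ih =>
    intro f' lst i c h h'
    cases f' with
    | zero =>
      have hlt : ¬ (i + c < lst.length) := by omega
      simp [pvAW, hlt]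
    | succ g =>
      simp only [pvAW]
      split_ifs with hc
      · exact ih g lst i (c+1) (by omega) (by omega)
      · rfl

theorem pvBRuns_length : ∀ (lst : List Int), (pvBRuns lst).length = lst.length := by
  intro lst
  induction lst using pvBRuns.induct with
  | case1 => rfl
  | case2 _ => rfl
  | case3 x y rest ih => simp [pvBRuns]; simpa [pvBRuns] using ih

-- the DP run value equals A's rescanned run length, at every in-range index
theorem pvRunsEq : ∀ (lst : List Int) (i : Nat), i < lst.length →
    (pvBRuns lst).getD i 1 = pvAW lst lst.length i 1 := by
  intro lst
  induction lst using pvBRuns.induct with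
  | case1 => intro i hi; simp at hi
  | case2 x =>
    intro i hi
    have : i = 0 := by simpa using hi
    subst this
    simp [pvBRuns, pvAW]
  | case3 x y rest ih =>
    intro i hi
    cases i with
    | zero =>
      by_cases hy : y = x + 1
      · have hne : pvBRuns (y :: rest) ≠ [] := by
          intro h
          have hl := pvBRuns_length (y :: rest)
          rw [h] at hl
          simp at hl
        obtain ⟨r, rs, hr⟩ := List.exists_cons_of_ne_nil hne
        have h0 : (y :: rest).getD 0 0 = x + 1 := by simp [hy]
        have hext := pvAW_ext x ((y :: rest).length + 1) (y :: rest) 0 h0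
        simp only [Nat.zero_add] at hext
        have hstep : pvAW (y :: rest) ((y :: rest).length + 1) 0 0
            = pvAW (y :: rest) ((y :: rest).length) 0 1 := by
          simp [pvAW]
        have hih := ih 0 (by simp)
        have hfuel : (x :: y :: rest).length = (y :: rest).length + 1 := by simp
        have hB : pvBRuns (x :: y :: rest) = (r + 1) :: r :: rs := by
          simp only [pvBRuns]
          rw [hr]
          simp [hy]
        rw [hfuel, hext, hstep, ← hih, hB, hr]
        simp
      · have hfuel : (x :: y :: rest).length = rest.length + 1 + 1 := by simp
        rw [hfuel]
        simp [pvBRuns, pvAW, hy]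
    | succ j =>
      have hj : j < (y :: rest).length := by simpa using hi
      have hih := ih j hj
      have hshift := pvAW_shift x ((x :: y :: rest).length) (y :: rest) j 1
      have hstable := pvAW_stable ((x :: y :: rest).length) ((y :: rest).length) (y :: rest) j 1
        (by simp only [List.length_cons]; omega) (by simp only [List.length_cons]; omega)
      calc (pvBRuns (x :: y :: rest)).getD (j+1) 1
          = (pvBRuns (y :: rest)).getD j 1 := by simp [pvBRuns]
        _ = pvAW (y :: rest) ((y :: rest).length) j 1 := hih
        _ = pvAW (y :: rest) ((x :: y :: rest).length) j 1 := hstable.symm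
        _ = pvAW (x :: y :: rest) ((x :: y :: rest).length) (j+1) 1 := hshift.symm

theorem pvScanEq (lst : List Int) : pvBScan lst = pvAScan lst := by
  unfold pvBScan pvAScan
  apply PySem.List.foldl_congr_mem
  intro acc i hi
  have hlt : i < lst.length := List.mem_range.mp hi
  rw [pvRunsEq lst i hlt]

theorem pvLoopEq : ∀ (f : Nat) (lst : List Int) (moves : Int),
    pvBLoop f lst moves = pvALoop f lst moves := by
  intro f
  induction f with
  | zero => intro lst moves; rfl
  | succ f ih =>
    intro lst moves
    simp only [pvBLoop, pvALoop, pvScanEq]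
    split_ifs
    · rfl
    · rfl
    · exact ih _ _

-- ===== VERDICT (by name: the statement is the Claim_ definition above) =====
theorem min_no_of_turns_spec : Claim_equal_min_no_of_turns := by
  intro L _
  unfold Spec_min_no_of_turns min_no_of_turns min_no_of_turns_alt
  cases L with
  | nil => rfl
  | cons x t => simp [pvLoopEq]
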